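-- pv_equiv track=rewrite | github.com/COS30019-Assignment2-group2/search-strategy- | Nodes_GBFS.py | bfs
-- ===== SOURCE A (Python) =====
-- def bfs(nodes, edges, origin, destination):
--     queue = [(origin, [origin])]
--     visited = set()
--
--     while queue:
--         node, path = queue.pop(0)
--         if node == destination:
--             return path
--         if node not in visited:
--             visited.add(node)
--             for neighbor in sorted([end for start, end in edges if start == node]):
--                 queue.append((neighbor, path + [neighbor]))
--
--     return None
-- ===== SOURCE B (Python) =====
-- def bfs(nodes, edges, origin, destination):
--     # Build a sorted-adjacency index once (no per-node edge scan), run a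
--     # cursor-based BFS over bare nodes with parent pointers, and reconstruct
--     # the path by walking parents back from the destination.
--     adj = {}
--     for start, end in edges:
--         adj.setdefault(start, []).append(end)
--
--     parent = {origin: None}
--     queue = [origin]
--     i = 0
--     while i < len(queue):
--         node = queue[i]
--         i += 1
--         if node == destination:
--             path = []
--             while node is not None:
--                 path.append(node)
--                 node = parent[node]
--             return path[::-1]
--         for neighbor in sorted(adj.get(node, [])):
--             if neighbor not in parent:
--                 parent[neighbor] = node
--                 queue.append(neighbor)
--     return None
-- ===== Notes on version B (the rewrite author's own statement) =====
-- stated objective: alternative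
-- what changed: Replaced the per-dequeue scan of the whole edge list and the path-carrying queue entries by an adjacency index built once from the edges, a cursor-based bare-node queue with a parent-pointer dict (enqueue-time dedup), and reconstruction of the answer by walking parents back from the destination.
import Mathlib
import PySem

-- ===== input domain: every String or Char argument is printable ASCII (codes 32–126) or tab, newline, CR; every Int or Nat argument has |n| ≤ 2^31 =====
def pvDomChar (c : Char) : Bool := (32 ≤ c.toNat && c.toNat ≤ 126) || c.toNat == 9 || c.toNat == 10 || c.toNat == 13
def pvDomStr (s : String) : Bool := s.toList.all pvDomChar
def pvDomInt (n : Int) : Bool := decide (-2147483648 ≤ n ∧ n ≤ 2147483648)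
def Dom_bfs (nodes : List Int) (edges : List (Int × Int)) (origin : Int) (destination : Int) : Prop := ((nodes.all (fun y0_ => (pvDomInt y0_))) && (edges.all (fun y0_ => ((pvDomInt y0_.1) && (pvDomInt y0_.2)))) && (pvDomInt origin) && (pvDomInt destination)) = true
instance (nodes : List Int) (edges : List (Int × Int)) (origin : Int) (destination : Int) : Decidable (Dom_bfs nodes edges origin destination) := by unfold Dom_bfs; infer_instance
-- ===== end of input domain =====

-- B replaces A's per-node edge-list scan and path-carrying queue entries by a sorted-adjacency
-- index built once, a cursor-based bare-node queue with parent pointers (enqueue-time dedup),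
-- and backward path reconstruction from the destination; same return value.

-- two counting facts cited by the ports' termination proofs
theorem pvCard_le (l₁ l₂ : List Int) (p₁ p₂ : Int → Bool)
    (h : ∀ x, x ∈ l₁ → p₁ x = true → x ∈ l₂ ∧ p₂ x = true) :
    (l₁.filter p₁).toFinset.card ≤ (l₂.filter p₂).toFinset.card := by
  apply Finset.card_le_card
  intro x hx
  simp only [List.mem_toFinset, List.mem_filter] at hx ⊢
  exact h x hx.1 hx.2

theorem pvCard_lt (l₁ l₂ : List Int) (p₁ p₂ : Int → Bool) (n : Int)
    (h : ∀ x, x ∈ l₁ → p₁ x = true → x ∈ l₂ ∧ p₂ x = true ∧ x ≠ n)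
    (hn : n ∈ l₂) (hpn : p₂ n = true) :
    (l₁.filter p₁).toFinset.card < (l₂.filter p₂).toFinset.card := by
  have hsub : (l₁.filter p₁).toFinset ⊆ ((l₂.filter p₂).toFinset).erase n := by
    intro x hx
    simp only [List.mem_toFinset, List.mem_filter, Finset.mem_erase] at hx ⊢
    exact ⟨(h x hx.1 hx.2).2.2, (h x hx.1 hx.2).1, (h x hx.1 hx.2).2.1⟩
  have hmem : n ∈ (l₂.filter p₂).toFinset := by
    simp only [List.mem_toFinset, List.mem_filter]; exact ⟨hn, hpn⟩
  exact lt_of_le_of_lt (Finset.card_le_card hsub) (Finset.card_erase_lt_of_mem hmem)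

-- ===== PORT A =====
-- sorted([end for start, end in edges if start == node])
def bfsNbrsA (edges : List (Int × Int)) (node : Int) : List Int :=
  PySem.List.sorted ((edges.filter (fun e => e.1 == node)).map Prod.snd) (fun x => x) false

-- cited by bfsLoopA's decreasing_by
theorem bfsNbrsA_sub_ends (edges : List (Int × Int)) (node : Int) (m : Int)
    (h : m ∈ bfsNbrsA edges node) : m ∈ edges.map Prod.snd := by
  have h2 : m ∈ (edges.filter (fun e => e.1 == node)).map Prod.snd := by
    unfold bfsNbrsA at h
    exact (PySem.List.mem_sorted _ _ _ _).1 h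
  rcases List.mem_map.1 h2 with ⟨e, he, hex⟩
  exact List.mem_map.2 ⟨e, List.mem_of_mem_filter he, hex⟩

def bfsLoopA (edges : List (Int × Int)) (destination : Int)
    (queue : List (Int × List Int)) (visited : PySem.Set Int) : Option (List Int) :=
  match queue with
  | [] => none
  | (node, path) :: rest =>
    if node = destination then some path
    else if node ∈ visited then bfsLoopA edges destination rest visited
    else
      bfsLoopA edges destination
        (rest ++ (bfsNbrsA edges node).map (fun m => (m, path ++ [m])))
        (PySem.Set.add visited node)
termination_by
  (((queue.map Prod.fst ++ edges.map Prod.snd).filter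
      (fun x => !(decide (x ∈ visited)))).toFinset.card, queue.length)
decreasing_by
  · -- visited duplicate: same candidates, queue shorter
    have hle := pvCard_le (rest.map Prod.fst ++ edges.map Prod.snd)
      (((node, path) :: rest).map Prod.fst ++ edges.map Prod.snd)
      (fun x => !(decide (x ∈ visited))) (fun x => !(decide (x ∈ visited)))
      (fun x hx hp => ⟨by simp only [List.map_cons, List.mem_append, List.mem_cons] at hx ⊢; tauto, hp⟩)
    rcases lt_or_eq_of_le hle with hlt | heq
    · exact Prod.Lex.left _ _ hlt
    · rw [heq]; exact Prod.Lex.right _ (by simp)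
  · -- fresh node: strictly fewer undiscovered candidates
    apply Prod.Lex.left
    apply pvCard_lt _ _ _ _ node
    · intro x hx hp
      have hp' : x ∉ PySem.Set.add visited node := by simpa using hp
      rw [PySem.Set.mem_add, not_or] at hp'
      refine ⟨?_, by simp [hp'.1], hp'.2⟩
      simp only [List.map_append, List.map_map, List.mem_append, List.map_cons,
        List.mem_cons] at hx ⊢
      rcases hx with (h | h) | h
      · tauto
      · have : x ∈ edges.map Prod.snd :=
          bfsNbrsA_sub_ends edges node x (by simpa [Function.comp] using h)
        tauto
      · tauto
    · exact List.mem_append.2 (Or.inl (by simp))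
    · simpa using ‹node ∉ visited›

-- def bfs: queue = [(origin, [origin])]; visited = set(); while queue: …
def bfs (nodes : List Int) (edges : List (Int × Int)) (origin : Int) (destination : Int) : Option (List Int) :=
  bfsLoopA edges destination [(origin, [origin])] PySem.Set.empty

-- ===== PORT B =====
-- adj = {}; for start, end in edges: adj.setdefault(start, []).append(end)
-- (setdefault-then-append is exactly adj[start] = adj.get(start, []) + [end], i.e. Dict.modify)
def bfsAdj (edges : List (Int × Int)) : PySem.Dict Int (List Int) :=
  edges.foldl (fun d p => d.modify p.1 [] (fun l => l ++ [p.2])) PySem.Dict.empty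

-- for neighbor in sorted(adj.get(node, [])): if neighbor not in parent: parent[neighbor] = node; queue.append(neighbor)
-- returns the updated parent dict and the nodes appended to the queue
def bfsExpandB (node : Int) (ms : List Int) (parent : PySem.Dict Int (Option Int)) :
    PySem.Dict Int (Option Int) × List Int :=
  match ms with
  | [] => (parent, [])
  | m :: rest =>
    if parent.contains m then bfsExpandB node rest parent
    else
      let r := bfsExpandB node rest (parent.insert m (some node))
      (r.1, m :: r.2)

-- facts about bfsExpandB cited by bfsLoopB's decreasing_by
theorem bfsExpandB_contains_mono (node : Int) (ms : List Int) (parent : PySem.Dict Int (Option Int))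
    (x : Int) (h : parent.contains x = true) : (bfsExpandB node ms parent).1.contains x = true := by
  induction ms generalizing parent with
  | nil => exact h
  | cons m rest ih =>
    cases hc : parent.contains m with
    | true => simpa [bfsExpandB, hc] using ih parent h
    | false =>
      simpa [bfsExpandB, hc] using ih _ (by simp [PySem.Dict.contains_insert, h])

theorem bfsExpandB_mem (node : Int) (ms : List Int) (parent : PySem.Dict Int (Option Int))
    (x : Int) (h : x ∈ (bfsExpandB node ms parent).2) :
    x ∈ ms ∧ parent.contains x = false ∧ (bfsExpandB node ms parent).1.contains x = true := by
  induction ms generalizing parent with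
  | nil => simp [bfsExpandB] at h
  | cons m rest ih =>
    cases hc : parent.contains m with
    | true =>
      simp only [bfsExpandB, hc] at h ⊢
      rcases ih parent h with ⟨h1, h2, h3⟩
      exact ⟨List.mem_cons_of_mem _ h1, h2, h3⟩
    | false =>
      simp only [bfsExpandB, hc, Bool.false_eq_true, if_false] at h ⊢
      rcases List.mem_cons.1 h with rfl | hx
      · refine ⟨List.mem_cons_self, hc, ?_⟩
        exact bfsExpandB_contains_mono _ _ _ _ (by simp)
      · rcases ih _ hx with ⟨h1, h2, h3⟩
        have h2' : parent.contains x = false := by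
          rcases eq_or_ne x m with rfl | hne
          · exact hc
          · simpa [PySem.Dict.contains_insert, hne] using h2
        exact ⟨List.mem_cons_of_mem _ h1, h2', h3⟩

theorem bfsExpandB_nil (node : Int) (ms : List Int) (parent : PySem.Dict Int (Option Int))
    (h : (bfsExpandB node ms parent).2 = []) : (bfsExpandB node ms parent).1 = parent := by
  induction ms generalizing parent with
  | nil => rfl
  | cons m rest ih =>
    cases hc : parent.contains m with
    | true =>
      simp only [bfsExpandB, hc] at h ⊢
      exact ih parent h
    | false =>
      simp [bfsExpandB, hc] at h


-- path = []; while node is not None: path.append(node); node = parent[node]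
-- fuel = parent.size + 1 is a Lean totality guard only: the parent chain is acyclic in every
-- reachable state (proved below), so the fuel never runs out and a missing key never occurs
def bfsWalk (fuel : Nat) (parent : PySem.Dict Int (Option Int)) (node : Int) (path : List Int) : List Int :=
  match fuel with
  | 0 => path
  | fuel + 1 =>
    match parent.get? node with
    | none => path ++ [node]        -- Python would raise KeyError here; unreachable
    | some none => path ++ [node]
    | some (some w) => bfsWalk fuel parent w (path ++ [node])

-- cited by bfsLoopB's decreasing_by
theorem bfsAdjGetD_sub_values (adj : PySem.Dict Int (List Int)) (node : Int) (m : Int)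
    (h : m ∈ adj.getD node []) : m ∈ adj.values.flatten := by
  rw [PySem.Dict.getD_eq_get?_getD] at h
  cases hg : adj.get? node with
  | none => rw [hg] at h; simp at h
  | some l =>
    rw [hg] at h
    have hl : l ∈ adj.values := by
      have := PySem.Dict.mem_items_of_get?_eq_some adj hg
      simp only [PySem.Dict.values]
      exact List.mem_map.2 ⟨(node, l), this, rfl⟩
    exact List.mem_flatten.2 ⟨l, hl, h⟩

-- while i < len(queue): node = queue[i]; i += 1; … — the recursion follows the pending
-- suffix queue[i:]; queue.append adds at its end
def bfsLoopB (adj : PySem.Dict Int (List Int)) (destination : Int)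
    (queue : List Int) (parent : PySem.Dict Int (Option Int)) : Option (List Int) :=
  match queue with
  | [] => none
  | node :: rest =>
    if node = destination then
      -- return path[::-1]
      some (bfsWalk (parent.size + 1) parent node []).reverse
    else
      let r := bfsExpandB node (PySem.List.sorted (adj.getD node []) (fun x => x) false) parent
      bfsLoopB adj destination (rest ++ r.2) r.1
termination_by
  (((queue ++ adj.values.flatten).filter
      (fun x => !(parent.contains x))).toFinset.card, queue.length)
decreasing_by
  rcases hq : (bfsExpandB node (PySem.List.sorted (adj.getD node []) (fun x => x) false) parent).2 with _ | ⟨m, q'⟩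
  · -- nothing enqueued: parent unchanged, queue shorter (or fewer candidates)
    rw [bfsExpandB_nil _ _ _ hq]
    have hle := pvCard_le (rest ++ [] ++ adj.values.flatten) (node :: rest ++ adj.values.flatten)
      (fun x => !(parent.contains x)) (fun x => !(parent.contains x))
      (fun x hx hpx => ⟨by simp only [List.mem_append, List.mem_cons, List.not_mem_nil] at hx ⊢; tauto, hpx⟩)
    rcases lt_or_eq_of_le hle with hlt | heq
    · exact Prod.Lex.left _ _ hlt
    · rw [heq]; exact Prod.Lex.right _ (by simp)
  · -- at least one fresh node recorded: strictly fewer undiscovered candidates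
    apply Prod.Lex.left
    have hm := bfsExpandB_mem node (PySem.List.sorted (adj.getD node []) (fun x => x) false) parent m
      (by rw [hq]; exact List.mem_cons_self)
    apply pvCard_lt _ _ _ _ m
    · intro x hx hpx
      simp only [Bool.not_eq_eq_eq_not, Bool.not_true] at hpx
      have hxold : parent.contains x = false := by
        by_contra hcne
        have := bfsExpandB_contains_mono node (PySem.List.sorted (adj.getD node []) (fun x => x) false) parent x
          (by revert hcne; cases parent.contains x <;> simp)
        simp [this] at hpx
      have hxm : x ≠ m := by
        intro hxe; subst hxe
        rw [hm.2.2] at hpx; simp at hpx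
      refine ⟨?_, by simp [hxold], hxm⟩
      rcases List.mem_append.1 hx with h | h
      · rcases List.mem_append.1 h with h1 | h1
        · exact List.mem_append.2 (Or.inl (List.mem_cons_of_mem _ h1))
        · have hx2 : x ∈ (bfsExpandB node (PySem.List.sorted (adj.getD node []) (fun x => x) false) parent).2 := by
            rw [hq]; exact h1
          have hx3 := (bfsExpandB_mem _ _ _ x hx2).1
          have hx4 : x ∈ adj.getD node [] := (PySem.List.mem_sorted _ _ _ _).1 hx3
          exact List.mem_append.2 (Or.inr (bfsAdjGetD_sub_values adj node x hx4))
      · exact List.mem_append.2 (Or.inr h)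
    · have hm4 : m ∈ adj.getD node [] := (PySem.List.mem_sorted _ _ _ _).1 hm.1
      exact List.mem_append.2 (Or.inr (bfsAdjGetD_sub_values adj node m hm4))
    · simp [hm.2.1]

-- def bfs: build adj once; parent = {origin: None}; queue = [origin]; i = 0; while i < len(queue): …
def bfs_alt (nodes : List Int) (edges : List (Int × Int)) (origin : Int) (destination : Int) : Option (List Int) :=
  bfsLoopB (bfsAdj edges) destination [origin] (PySem.Dict.ofList [(origin, (none : Option Int))])

-- ===== PRECONDITION & SPEC =====
def Spec_bfs (nodes : List Int) (edges : List (Int × Int)) (origin : Int) (destination : Int) (out : Option (List Int)) : Prop := out = bfs_alt nodes edges origin destination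
instance (nodes : List Int) (edges : List (Int × Int)) (origin : Int) (destination : Int) (out : Option (List Int)) : Decidable (Spec_bfs nodes edges origin destination out) := by unfold Spec_bfs; infer_instance

-- ===== CLAIM (what is proved, stated in full; the proofs are below) =====
def Claim_equal_bfs : Prop := ∀ (nodes : List Int) (edges : List (Int × Int)) (origin : Int) (destination : Int), Dom_bfs nodes edges origin destination → Spec_bfs nodes edges origin destination (bfs nodes edges origin destination)

-- ===== LEMMAS AND PROOFS =====
-- first occurrences, in order, of A's queue entries whose node is not yet "seen"
def pvF : List (Int × List Int) → List Int → List (Int × List Int)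
  | [], _ => []
  | (n, p) :: q, s => if n ∈ s then pvF q s else (n, p) :: pvF q (n :: s)

theorem pvF_congr (q : List (Int × List Int)) (s t : List Int)
    (h : ∀ x : Int, x ∈ s ↔ x ∈ t) : pvF q s = pvF q t := by
  induction q generalizing s t with
  | nil => rfl
  | cons e q ih =>
    obtain ⟨n, p⟩ := e
    simp only [pvF]
    by_cases hn : n ∈ s
    · rw [if_pos hn, if_pos ((h n).1 hn)]
      exact ih s t h
    · rw [if_neg hn, if_neg (fun hc => hn ((h n).2 hc))]
      rw [ih (n :: s) (n :: t) (by intro x; simp only [List.mem_cons]; rw [h x])]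

theorem pvF_append (q r : List (Int × List Int)) (s : List Int) :
    pvF (q ++ r) s = pvF q s ++ pvF r (q.map Prod.fst ++ s) := by
  induction q generalizing s with
  | nil => simp [pvF]
  | cons e q ih =>
    obtain ⟨n, p⟩ := e
    simp only [List.cons_append, pvF, List.map_cons]
    by_cases hn : n ∈ s
    · rw [if_pos hn, if_pos hn, ih s]
      congr 1
      apply pvF_congr
      intro x
      simp only [List.mem_cons, List.mem_append]
      constructor
      · tauto
      · rintro (rfl | h | h) <;> tauto
    · rw [if_neg hn, if_neg hn, ih (n :: s), List.cons_append]
      congr 2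
      apply pvF_congr
      intro x
      simp only [List.mem_cons, List.mem_append]
      tauto

-- "following parent pointers from n yields the reversed path p" (p ends in n, starts at the root)
inductive Reaches (parent : PySem.Dict Int (Option Int)) : Int → List Int → Prop
  | root (n : Int) : parent.get? n = some none → Reaches parent n [n]
  | step (n w : Int) (p : List Int) : parent.get? n = some (some w) →
      Reaches parent w p → Reaches parent n (p ++ [n])

theorem reaches_insert_fresh (parent : PySem.Dict Int (Option Int)) (m : Int) (v : Option Int)
    (hm : parent.get? m = none) {n : Int} {p : List Int} (h : Reaches parent n p) :
    Reaches (parent.insert m v) n p := by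
  induction h with
  | root n hn =>
    have hne : n ≠ m := by intro he; subst he; rw [hm] at hn; cases hn
    exact Reaches.root n (by rw [PySem.Dict.get?_insert_of_ne parent v hne]; exact hn)
  | step n w p hn _ ih =>
    have hne : n ≠ m := by intro he; subst he; rw [hm] at hn; cases hn
    exact Reaches.step n w p (by rw [PySem.Dict.get?_insert_of_ne parent v hne]; exact hn) ih

-- the reconstruction loop walks the parent chain: enough fuel yields acc ++ p.reverse
theorem bfsWalk_eq (parent : PySem.Dict Int (Option Int)) {n : Int} {p : List Int}
    (h : Reaches parent n p) : ∀ (fuel : Nat), p.length ≤ fuel →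
    ∀ acc : List Int, bfsWalk fuel parent n acc = acc ++ p.reverse := by
  induction h with
  | root n hn =>
    intro fuel hf acc
    match fuel with
    | 0 => simp at hf
    | fuel + 1 => simp [bfsWalk, hn]
  | step n w p hn _ ih =>
    intro fuel hf acc
    match fuel with
    | 0 => simp at hf
    | fuel + 1 =>
      have hlen : p.length ≤ fuel := by
        simp only [List.length_append, List.length_cons, List.length_nil] at hf; omega
      simp only [bfsWalk, hn, ih fuel hlen (acc ++ [n]), List.reverse_append,
        List.reverse_cons, List.reverse_nil, List.nil_append, List.append_assoc]

-- B's neighbor loop agrees with pvF on the appended queue part; parent pointers: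
-- existing chains survive, size grows, and every recorded node's chain spells its pvF path
theorem bfsExpand_sim (node : Int) (ms : List Int) (parent : PySem.Dict Int (Option Int))
    (p : List Int) (s : List Int) (h : ∀ x : Int, x ∈ s ↔ parent.contains x = true)
    (hp : Reaches parent node p) (hlen : p.length ≤ parent.size) :
    (bfsExpandB node ms parent).2 = (pvF (ms.map (fun m => (m, p ++ [m]))) s).map Prod.fst
    ∧ (∀ x : Int, (bfsExpandB node ms parent).1.contains x = true ↔ x ∈ s ∨ x ∈ ms)
    ∧ (∀ (n' : Int) (p' : List Int), Reaches parent n' p' → Reaches (bfsExpandB node ms parent).1 n' p')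
    ∧ parent.size ≤ (bfsExpandB node ms parent).1.size
    ∧ (∀ (n' : Int) (p' : List Int), (n', p') ∈ pvF (ms.map (fun m => (m, p ++ [m]))) s →
        Reaches (bfsExpandB node ms parent).1 n' p'
        ∧ p'.length ≤ (bfsExpandB node ms parent).1.size) := by
  induction ms generalizing parent s with
  | nil =>
    refine ⟨rfl, ?_, fun _ _ hh => hh, le_refl _, ?_⟩
    · intro x; simp only [bfsExpandB, List.not_mem_nil, or_false]; exact (h x).symm
    · intro n' p' hh; simp [pvF] at hh
  | cons m ms ih =>
    cases hc : parent.contains m with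
    | true =>
      have hms : m ∈ s := (h m).2 hc
      obtain ⟨i1, i2, i3, i4, i5⟩ := ih parent s h hp hlen
      have hE : bfsExpandB node (m :: ms) parent = bfsExpandB node ms parent := by
        simp [bfsExpandB, hc]
      have hF : pvF ((m :: ms).map (fun m => (m, p ++ [m]))) s
          = pvF (ms.map (fun m => (m, p ++ [m]))) s := by
        simp only [List.map_cons, pvF, if_pos hms]
      rw [hE, hF]
      refine ⟨i1, ?_, i3, i4, i5⟩
      intro x
      rw [i2 x]
      constructor
      · rintro (hx | hx)
        · exact Or.inl hx
        · exact Or.inr (List.mem_cons_of_mem _ hx)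
      · rintro (hx | hx)
        · exact Or.inl hx
        · rcases List.mem_cons.1 hx with rfl | hx
          · exact Or.inl hms
          · exact Or.inr hx
    | false =>
      have hms : m ∉ s := by intro hm; have := (h m).1 hm; rw [this] at hc; cases hc
      have hget : parent.get? m = none := by
        have hco := PySem.Dict.contains_eq_isSome_get? parent m
        rw [hc] at hco
        cases hg : parent.get? m with
        | none => rfl
        | some v => rw [hg] at hco; simp at hco
      have hp' : Reaches (parent.insert m (some node)) node p :=
        reaches_insert_fresh parent m (some node) hget hp
      have hpm : Reaches (parent.insert m (some node)) m (p ++ [m]) :=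
        Reaches.step m node p (PySem.Dict.get?_insert_self parent m (some node)) hp'
      have hsize : (parent.insert m (some node)).size = parent.size + 1 := by
        rw [PySem.Dict.size_insert, hc]; simp
      have h' : ∀ x : Int, x ∈ m :: s ↔ (parent.insert m (some node)).contains x = true := by
        intro x
        rw [PySem.Dict.contains_insert]
        by_cases hxm : x = m
        · subst hxm; simp
        · simp [hxm, h x]
      obtain ⟨i1, i2, i3, i4, i5⟩ := ih (parent.insert m (some node)) (m :: s) h' hp'
        (by rw [hsize]; omega)
      have hE1 : (bfsExpandB node (m :: ms) parent).1
          = (bfsExpandB node ms (parent.insert m (some node))).1 := by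
        simp [bfsExpandB, hc]
      have hE2 : (bfsExpandB node (m :: ms) parent).2
          = m :: (bfsExpandB node ms (parent.insert m (some node))).2 := by
        simp [bfsExpandB, hc]
      have hF : pvF ((m :: ms).map (fun m => (m, p ++ [m]))) s
          = (m, p ++ [m]) :: pvF (ms.map (fun m => (m, p ++ [m]))) (m :: s) := by
        simp only [List.map_cons, pvF, if_neg hms]
      refine ⟨?_, ?_, ?_, ?_, ?_⟩
      · rw [hE2, hF, List.map_cons, i1]
      · intro x
        rw [hE1, i2 x]
        simp only [List.mem_cons]
        tauto
      · intro n' p' hh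
        rw [hE1]
        exact i3 n' p' (reaches_insert_fresh parent m (some node) hget hh)
      · rw [hE1]; omega
      · intro n' p' hh
        rw [hF] at hh
        rw [hE1]
        rcases List.mem_cons.1 hh with heq | hh
        · have h12 : n' = m ∧ p' = p ++ [m] := by simpa using heq
          rw [h12.1, h12.2]
          refine ⟨i3 m (p ++ [m]) hpm, ?_⟩
          have : (p ++ [m]).length ≤ (parent.insert m (some node)).size := by
            rw [hsize]; simp; omega
          omega
        · exact i5 n' p' hh

-- the simulation invariant between A's state and B's state
def bfsInv (destination : Int) (qA : List (Int × List Int)) (vis : PySem.Set Int)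
    (qB : List Int) (parent : PySem.Dict Int (Option Int)) : Prop :=
  qB = (pvF qA vis).map Prod.fst
  ∧ (∀ (n : Int) (p : List Int), (n, p) ∈ pvF qA vis →
      Reaches parent n p ∧ p.length ≤ parent.size)
  ∧ (∀ x : Int, parent.contains x = true ↔ x ∈ vis ∨ x ∈ qA.map Prod.fst)
  ∧ destination ∉ vis

theorem bfsLoop_sim (edges : List (Int × Int)) (adj : PySem.Dict Int (List Int))
    (destination : Int)
    (hadj : ∀ x : Int, PySem.List.sorted (adj.getD x []) (fun y => y) false = bfsNbrsA edges x)
    (qA : List (Int × List Int)) (vis : PySem.Set Int) :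
    ∀ (qB : List Int) (parent : PySem.Dict Int (Option Int)),
      bfsInv destination qA vis qB parent →
      bfsLoopA edges destination qA vis = bfsLoopB adj destination qB parent := by
  induction qA, vis using bfsLoopA.induct edges destination with
  | case1 visited =>
    intro qB parent hInv
    obtain ⟨h1, _, _, _⟩ := hInv
    simp only [pvF, List.map_nil] at h1
    subst h1
    simp [bfsLoopA, bfsLoopB]
  | case2 visited path rest =>
    intro qB parent hInv
    obtain ⟨h1, h2, h3, h4⟩ := hInv
    have hdv : destination ∉ (visited : List Int) := h4
    have hF : pvF ((destination, path) :: rest) visited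
        = (destination, path) :: pvF rest (destination :: visited) := by
      simp only [pvF, if_neg hdv]
    rw [hF] at h1 h2
    subst h1
    obtain ⟨hr, hlen⟩ := h2 destination path List.mem_cons_self
    simp only [List.map_cons, bfsLoopA, bfsLoopB]
    rw [bfsWalk_eq parent hr (parent.size + 1) (by omega) []]
    simp
  | case3 visited node path rest hdest hvis ih =>
    intro qB parent hInv
    obtain ⟨h1, h2, h3, h4⟩ := hInv
    have hF : pvF ((node, path) :: rest) visited = pvF rest visited := by
      simp only [pvF, if_pos hvis]
    rw [hF] at h1 h2
    have hstep : bfsLoopA edges destination ((node, path) :: rest) visited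
        = bfsLoopA edges destination rest visited := by
      simp [bfsLoopA, hdest, hvis]
    rw [hstep]
    apply ih
    refine ⟨h1, h2, ?_, h4⟩
    intro x
    rw [h3 x]
    simp only [List.map_cons, List.mem_cons]
    constructor
    · rintro (hx | rfl | hx)
      · exact Or.inl hx
      · exact Or.inl hvis
      · exact Or.inr hx
    · rintro (hx | hx)
      · exact Or.inl hx
      · exact Or.inr (Or.inr hx)
  | case4 visited node path rest hdest hvis ih =>
    intro qB parent hInv
    obtain ⟨h1, h2, h3, h4⟩ := hInv
    have hF : pvF ((node, path) :: rest) visited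
        = (node, path) :: pvF rest (node :: visited) := by
      simp only [pvF, if_neg hvis]
    rw [hF] at h1 h2
    subst h1
    obtain ⟨hrch, hlen⟩ := h2 node path List.mem_cons_self
    have hA : bfsLoopA edges destination ((node, path) :: rest) visited
        = bfsLoopA edges destination
            (rest ++ (bfsNbrsA edges node).map (fun m => (m, path ++ [m])))
            (visited.add node) := by
      simp [bfsLoopA, hdest, hvis]
    have hB : bfsLoopB adj destination (((node, path) :: pvF rest (node :: visited)).map Prod.fst) parent
        = bfsLoopB adj destination
            ((pvF rest (node :: visited)).map Prod.fst
              ++ (bfsExpandB node (bfsNbrsA edges node) parent).2)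
            (bfsExpandB node (bfsNbrsA edges node) parent).1 := by
      simp only [List.map_cons, bfsLoopB, if_neg hdest]
      rw [hadj node]
    rw [hA, hB]
    have hs : ∀ x : Int, x ∈ rest.map Prod.fst ++ node :: visited ↔ parent.contains x = true := by
      intro x
      rw [h3 x]
      simp only [List.mem_append, List.mem_cons, List.map_cons]
      tauto
    obtain ⟨e1, e2, e3, e4, e5⟩ :=
      bfsExpand_sim node (bfsNbrsA edges node) parent path
        (rest.map Prod.fst ++ node :: visited) hs hrch hlen
    have hseen : ∀ x : Int, x ∈ (visited.add node : List Int) ↔ x ∈ node :: visited := by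
      intro x
      rw [PySem.Set.mem_add, List.mem_cons]
      tauto
    have hsplit : pvF (rest ++ (bfsNbrsA edges node).map (fun m => (m, path ++ [m]))) (visited.add node)
        = pvF rest (node :: visited)
          ++ pvF ((bfsNbrsA edges node).map (fun m => (m, path ++ [m])))
              (rest.map Prod.fst ++ node :: visited) := by
      rw [pvF_append,
        pvF_congr rest _ (node :: visited) hseen,
        pvF_congr ((bfsNbrsA edges node).map (fun m => (m, path ++ [m]))) _
          (rest.map Prod.fst ++ node :: visited)
          (fun x => by simp only [List.mem_append, hseen x])]
    apply ih
    refine ⟨?_, ?_, ?_, ?_⟩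
    · rw [hsplit, List.map_append, e1]
    · intro n p hnp
      rw [hsplit] at hnp
      rcases List.mem_append.1 hnp with hnp | hnp
      · obtain ⟨hr0, hl0⟩ := h2 n p (List.mem_cons_of_mem _ hnp)
        exact ⟨e3 n p hr0, le_trans hl0 e4⟩
      · exact e5 n p hnp
    · intro x
      rw [e2 x]
      have hc1 : x ∈ ((bfsNbrsA edges node).map (fun m => (m, path ++ [m]))).map Prod.fst
          ↔ x ∈ bfsNbrsA edges node := by
        simp [List.map_map, Function.comp]
      simp only [List.map_append, List.mem_append, List.mem_cons, hc1, hseen x]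
      tauto
    · intro hmem
      rw [PySem.Set.mem_add] at hmem
      rcases hmem with hmem | rfl
      · exact h4 hmem
      · exact hdest rfl

-- the one-pass adjacency index, read at node and sorted, is exactly A's sorted neighbor scan
theorem bfsAdj_sorted (edges : List (Int × Int)) (x : Int) :
    PySem.List.sorted ((bfsAdj edges).getD x []) (fun y => y) false = bfsNbrsA edges x := by
  unfold bfsAdj bfsNbrsA
  rw [PySem.Dict.getD_foldl_modify_append edges PySem.Dict.empty x]
  rw [PySem.Dict.getD_eq_get?_getD, PySem.Dict.get?_empty]
  rfl

-- ===== VERDICT (by name: the statement is the Claim_ definition above) =====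
theorem bfs_spec : Claim_equal_bfs := by
  intro nodes edges origin destination _
  unfold Spec_bfs bfs bfs_alt
  apply bfsLoop_sim edges (bfsAdj edges) destination (bfsAdj_sorted edges)
  have hD : PySem.Dict.ofList [(origin, (none : Option Int))]
      = PySem.Dict.empty.insert origin none := rfl
  have hF0 : pvF [(origin, [origin])] PySem.Set.empty = [(origin, [origin])] := by
    have hnm : origin ∉ (PySem.Set.empty : PySem.Set Int) := List.not_mem_nil
    simp only [pvF, if_neg hnm]
  refine ⟨by rw [hF0]; rfl, ?_, ?_, List.not_mem_nil⟩
  · intro n p hnp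
    rw [hF0] at hnp
    rcases List.mem_cons.1 hnp with heq | hnp
    · have hn : n = origin := congrArg Prod.fst heq
      have hp : p = [origin] := congrArg Prod.snd heq
      subst hn; subst hp
      rw [hD]
      refine ⟨Reaches.root _ (PySem.Dict.get?_insert_self _ _ _), ?_⟩
      simp [PySem.Dict.size_insert]
    · cases hnp
  · intro x
    rw [hD, PySem.Dict.contains_insert, PySem.Dict.contains_empty]
    simp only [Bool.or_false, beq_iff_eq, List.map_cons, List.map_nil, List.mem_cons,
      List.not_mem_nil, or_false]
    constructor
    · intro hx; exact Or.inr hx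
    · rintro (hx | hx)
      · exact absurd hx List.not_mem_nil
      · exact hx
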